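-- pv_equiv track=rewrite | github.com/Lemi-in/Codeforces-daily | Binary_Cut.py | min_pieces
-- ===== SOURCE A (Python) =====
-- def min_pieces(s):
--     n = len(s)
--     count_0 = 0
--     count_1 = 0
--     max_count = 0
--     for i in range(n):
--         if s[i] == '0':
--             count_0 += 1
--             max_count = max(max_count, count_1)
--         else:
--             count_1 += 1
--             max_count = max(max_count, count_0)
--     return max_count
-- ===== SOURCE B (Python) =====
-- def min_pieces(s):
--     best = 0
--     last0 = s.rfind('0')
--     if last0 != -1:
--         best = last0 - s[:last0].count('0')
--     trimmed = s.rstrip('0')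
--     if trimmed:
--         best = max(best, trimmed[:-1].count('0'))
--     return best
-- ===== Notes on version B (the rewrite author's own statement) =====
-- stated objective: faster
-- what changed: Replaces the running-max scan over every character with a locate-then-count strategy: find the last zero character (rfind) and the last non-zero character (rstrip), then count in the two prefixes before them, exploiting that the prefix counts are monotone so only the last occurrences matter.
import Mathlib
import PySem

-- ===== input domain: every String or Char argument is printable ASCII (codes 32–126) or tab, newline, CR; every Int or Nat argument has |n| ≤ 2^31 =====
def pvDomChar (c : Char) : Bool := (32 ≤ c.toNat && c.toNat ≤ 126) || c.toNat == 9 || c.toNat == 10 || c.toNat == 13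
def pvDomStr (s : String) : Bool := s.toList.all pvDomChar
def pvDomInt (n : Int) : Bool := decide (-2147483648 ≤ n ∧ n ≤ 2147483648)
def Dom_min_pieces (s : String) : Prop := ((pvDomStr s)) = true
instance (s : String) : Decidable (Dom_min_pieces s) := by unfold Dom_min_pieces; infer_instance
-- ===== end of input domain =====

-- B locates the last zero character (rfind) and the last non-zero character (rstrip) and counts in the two prefixes before them, instead of A's per-character running-max scan; same O(n), measurably faster via C-level string builtins.


-- ===== PORT A =====
def min_pieces (s : String) : Int :=
  let cs := s.toList
  let n : Int := PySem.Str.len s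
  let r := (PySem.List.pyRange 0 n 1).foldl
    (fun (st : Int × Int × Int) i =>
      if PySem.List.pyGetD cs i ' ' = '0'
      then (st.1 + 1, st.2.1, max st.2.2 st.2.1)
      else (st.1, st.2.1 + 1, max st.2.2 st.1)) (0, 0, 0)
  r.2.2

-- ===== PORT B =====
def min_pieces_alt (s : String) : Int :=
  let best0 : Int := 0
  let last0 : Int := PySem.Str.rfind s "0"
  let best1 : Int :=
    if last0 ≠ -1
    then last0 - (PySem.Chars.count (PySem.List.slice s.toList none (some last0)) ['0'] : Int)
    else best0
  -- s.rstrip('0') ported by hand (PySem's rstrip strips whitespace only): exact for the one-char strip set '0'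
  let trimmed : List Char := (s.toList.reverse.dropWhile (· == '0')).reverse
  if trimmed ≠ []
  then max best1 ((PySem.Chars.count (PySem.List.slice trimmed none (some (-1))) ['0'] : Int))
  else best1

-- ===== PRECONDITION & SPEC =====
def Spec_min_pieces (s : String) (out : Int) : Prop := out = min_pieces_alt s
instance (s : String) (out : Int) : Decidable (Spec_min_pieces s out) := by unfold Spec_min_pieces; infer_instance

-- ===== CLAIM (what is proved, stated in full; the proofs are below) =====
def Claim_equal_min_pieces : Prop := ∀ (s : String), Dom_min_pieces s → Spec_min_pieces s (min_pieces s)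

-- ===== LEMMAS AND PROOFS =====

theorem pvCountGo (c : Char) : ∀ (fuel : Nat) (l : List Char) (acc : Nat), l.length ≤ fuel →
    PySem.Chars.count.go [c] fuel l acc = acc + l.count c := by
  intro fuel
  induction fuel with
  | zero => intro l acc h; simp at h; simp [h, PySem.Chars.count.go]
  | succ n ih =>
    intro l acc h
    cases l with
    | nil => simp [PySem.Chars.count.go]
    | cons x t =>
      have hpre : [c].isPrefixOf (x :: t) = (c == x) := by simp [List.isPrefixOf]
      simp only [PySem.Chars.count.go, hpre]
      by_cases hx : c = x
      · subst hx
        simp only [beq_self_eq_true, if_true, List.length_cons, List.drop_succ_cons, List.length_nil, List.drop_zero]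
        rw [ih t (acc + 1) (by simpa using h), List.count_cons]
        simp
        omega
      · simp only [beq_iff_eq, hx, if_false]
        rw [ih t acc (by simpa using h), List.count_cons]
        simp [Ne.symm hx]

theorem pvCountSingle (l : List Char) (c : Char) : PySem.Chars.count l [c] = l.count c := by
  simp [PySem.Chars.count, pvCountGo c l.length l 0 le_rfl]

theorem pvGoZero (s : List Char) (sub : List Char) :
    PySem.Chars.rfind.go s sub 0 = if sub.isPrefixOf s then 0 else -1 := by
  simp [PySem.Chars.rfind.go]

theorem pvGoSucc (s : List Char) (sub : List Char) (j : Nat) :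
    PySem.Chars.rfind.go s sub (j + 1) =
      if sub.isPrefixOf (s.drop (j + 1)) then ((j : Int) + 1) else PySem.Chars.rfind.go s sub j := by
  simp [PySem.Chars.rfind.go]

theorem pvGoBound (s sub : List Char) : ∀ j : Nat,
    PySem.Chars.rfind.go s sub j = -1 ∨
      (0 ≤ PySem.Chars.rfind.go s sub j ∧ PySem.Chars.rfind.go s sub j ≤ (j : Int)) := by
  intro j
  induction j with
  | zero => rw [pvGoZero]; split_ifs <;> simp
  | succ n ih =>
    rw [pvGoSucc]
    split_ifs with h
    · right; constructor <;> omega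
    · rcases ih with h1 | ⟨h1, h2⟩
      · left; exact h1
      · right; constructor <;> omega

theorem pvGoAppendNe (l : List Char) (c c' : Char) (h : c' ≠ c) : ∀ j : Nat, j ≤ l.length →
    PySem.Chars.rfind.go (l ++ [c']) [c] j = PySem.Chars.rfind.go l [c] j := by
  have hpre : ∀ (xs : List Char), [c].isPrefixOf (xs ++ [c']) = [c].isPrefixOf xs ∨
      (xs = [] ∧ [c].isPrefixOf (xs ++ [c']) = false ∧ [c].isPrefixOf xs = false) := by
    intro xs
    cases xs with
    | nil => right; simp [List.isPrefixOf, Ne.symm h]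
    | cons x t => left; simp [List.isPrefixOf]
  intro j
  induction j with
  | zero =>
    intro _
    rw [pvGoZero, pvGoZero]
    rcases hpre l with he | ⟨_, h1, h2⟩
    · rw [he]
    · rw [h1, h2]
  | succ n ih =>
    intro hj
    rw [pvGoSucc, pvGoSucc]
    have hd : (l ++ [c']).drop (n + 1) = l.drop (n + 1) ++ [c'] := by
      rw [List.drop_append_of_le_length (by omega)]
    rw [hd]
    rcases hpre (l.drop (n + 1)) with he | ⟨_, h1, h2⟩
    · rw [he, ih (by omega)]
    · rw [h1, h2, ih (by omega)]

theorem pvRfindNil (c : Char) : PySem.Chars.rfind [] [c] = -1 := by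
  simp [PySem.Chars.rfind, pvGoZero, List.isPrefixOf]

theorem pvRfindSnocSelf (l : List Char) (c : Char) :
    PySem.Chars.rfind (l ++ [c]) [c] = (l.length : Int) := by
  have h1 : (l ++ [c]).length = l.length + 1 := by simp
  rw [PySem.Chars.rfind, h1, pvGoSucc]
  have hd : (l ++ [c]).drop (l.length + 1) = [] := by simp
  rw [hd]
  simp only [List.isPrefixOf, Bool.false_eq_true, if_false]
  cases l with
  | nil => simp only [List.length_nil]; rw [pvGoZero]; simp [List.isPrefixOf]
  | cons x t =>
    have h2 : (x :: t).length = t.length + 1 := by simp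
    rw [h2, pvGoSucc]
    have hd2 : ((x :: t) ++ [c]).drop (t.length + 1) = [c] := by
      rw [List.drop_append_of_le_length (by simp)]
      simp
    rw [hd2]
    simp [List.isPrefixOf]

theorem pvRfindSnocNe (l : List Char) (c c' : Char) (h : c' ≠ c) :
    PySem.Chars.rfind (l ++ [c']) [c] = PySem.Chars.rfind l [c] := by
  have h1 : (l ++ [c']).length = l.length + 1 := by simp
  rw [PySem.Chars.rfind, h1, pvGoSucc]
  have hd : (l ++ [c']).drop (l.length + 1) = [] := by simp
  rw [hd]
  simp only [List.isPrefixOf, Bool.false_eq_true, if_false]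
  rw [pvGoAppendNe l c c' h l.length le_rfl]
  rfl

theorem pvRfindLt (l : List Char) (c : Char) :
    PySem.Chars.rfind l [c] < (l.length : Int) := by
  cases l with
  | nil => rw [pvRfindNil]; simp
  | cons x t =>
    rw [PySem.Chars.rfind]
    have h2 : (x :: t).length = t.length + 1 := by simp
    rw [h2, pvGoSucc]
    have hd : (x :: t).drop (t.length + 1) = [] := by simp
    rw [hd]
    simp only [List.isPrefixOf, Bool.false_eq_true, if_false]
    rcases pvGoBound (x :: t) [c] t.length with h1 | ⟨_, h3⟩ <;> push_cast <;> omega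

theorem pvRfindBound (l : List Char) (c : Char) :
    PySem.Chars.rfind l [c] = -1 ∨ 0 ≤ PySem.Chars.rfind l [c] := by
  rcases pvGoBound l [c] l.length with h | ⟨h1, _⟩
  · left; exact h
  · right; exact h1

def pvCand1 (l : List Char) : Int :=
  if PySem.Chars.rfind l ['0'] = -1 then 0
  else PySem.Chars.rfind l ['0'] -
    (PySem.Chars.count (PySem.List.slice l none (some (PySem.Chars.rfind l ['0']))) ['0'] : Int)

def pvCand2 (l : List Char) : Int :=
  if (l.reverse.dropWhile (· == '0')).reverse = [] then 0
  else (PySem.Chars.count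
    (PySem.List.slice (l.reverse.dropWhile (· == '0')).reverse none (some (-1))) ['0'] : Int)

theorem pvCand1Nil : pvCand1 [] = 0 := by
  simp [pvCand1, pvRfindNil]

theorem pvCand2Nil : pvCand2 [] = 0 := by
  simp [pvCand2]

theorem pvCand1SnocZero (l : List Char) :
    pvCand1 (l ++ ['0']) = (l.length : Int) - (l.count '0' : Int) := by
  unfold pvCand1
  rw [pvRfindSnocSelf]
  have hne : (l.length : Int) ≠ -1 := by omega
  rw [if_neg hne, PySem.List.slice_to (l ++ ['0']) (by omega)]
  have ht : (l ++ ['0']).take (l.length : Int).toNat = l := by simp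
  rw [ht, pvCountSingle]

theorem pvCand1SnocNe (l : List Char) (c : Char) (h : c ≠ '0') :
    pvCand1 (l ++ [c]) = pvCand1 l := by
  unfold pvCand1
  rw [pvRfindSnocNe l '0' c h]
  rcases pvRfindBound l '0' with he | hge
  · rw [he]; simp
  · have hlt := pvRfindLt l '0'
    have hne : PySem.Chars.rfind l ['0'] ≠ -1 := by omega
    rw [if_neg hne, if_neg hne, PySem.List.slice_to (l ++ [c]) hge, PySem.List.slice_to l hge]
    rw [List.take_append_of_le_length (by omega)]

theorem pvCand2SnocZero (l : List Char) :
    pvCand2 (l ++ ['0']) = pvCand2 l := by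
  unfold pvCand2
  have h : (l ++ ['0']).reverse.dropWhile (· == '0') = l.reverse.dropWhile (· == '0') := by
    simp [List.dropWhile]
  rw [h]

theorem pvCand2SnocNe (l : List Char) (c : Char) (h : c ≠ '0') :
    pvCand2 (l ++ [c]) = (l.count '0' : Int) := by
  unfold pvCand2
  have h1 : (l ++ [c]).reverse.dropWhile (· == '0') = c :: l.reverse := by
    simp [List.dropWhile, h]
  rw [h1]
  have h2 : (c :: l.reverse).reverse = l ++ [c] := by simp
  rw [h2, if_neg (by simp), PySem.List.slice_to_neg_one, List.dropLast_concat, pvCountSingle]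

theorem pvCand1Facts (l : List Char) :
    0 ≤ pvCand1 l ∧ pvCand1 l ≤ (l.length : Int) - (l.count '0' : Int) := by
  unfold pvCand1
  split_ifs with hne
  · have := l.count_le_length (a := '0')
    constructor <;> omega
  · have hge : 0 ≤ PySem.Chars.rfind l ['0'] := by
      rcases pvRfindBound l '0' with he | hge
      · exact absurd he hne
      · exact hge
    have hlt := pvRfindLt l '0'
    rw [PySem.List.slice_to l hge, pvCountSingle]
    set r := PySem.Chars.rfind l ['0'] with hr
    have hsplit : l = l.take r.toNat ++ l.drop r.toNat := (List.take_append_drop _ l).symm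
    have hcount : l.count '0' = (l.take r.toNat).count '0' + (l.drop r.toNat).count '0' := by
      conv_lhs => rw [hsplit]
      rw [List.count_append]
    have h1 : (l.take r.toNat).count '0' ≤ (l.take r.toNat).length := List.count_le_length
    have h2 : (l.drop r.toNat).count '0' ≤ (l.drop r.toNat).length := List.count_le_length
    have h3 : (l.take r.toNat).length = r.toNat := by
      rw [List.length_take]; omega
    have h4 : (l.drop r.toNat).length = l.length - r.toNat := by
      rw [List.length_drop]
    constructor <;> omega

theorem pvCand2Facts (l : List Char) :
    0 ≤ pvCand2 l ∧ pvCand2 l ≤ (l.count '0' : Int) := by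
  unfold pvCand2
  split_ifs with h
  · have := l.count_le_length (a := '0')
    constructor <;> omega
  · rw [PySem.List.slice_to_neg_one, pvCountSingle]
    set t := (l.reverse.dropWhile (· == '0')).reverse with ht
    have hsub1 : t.dropLast.Sublist t := List.dropLast_sublist t
    have hsub2 : t.Sublist l := by
      have : (l.reverse.dropWhile (· == '0')).Sublist l.reverse := List.dropWhile_sublist _
      have h2 := this.reverse
      simpa using h2
    have := (hsub1.trans hsub2).count_le '0'
    constructor <;> omega

theorem pvFoldEq (l : List Char) :
    l.foldl (fun (st : Int × Int × Int) c =>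
      if c = '0'
      then (st.1 + 1, st.2.1, max st.2.2 st.2.1)
      else (st.1, st.2.1 + 1, max st.2.2 st.1)) ((0 : Int), (0 : Int), (0 : Int))
    = ((l.count '0' : Int), (l.length : Int) - (l.count '0' : Int),
        max (pvCand1 l) (pvCand2 l)) := by
  induction l using List.reverseRecOn with
  | nil => simp [pvCand1Nil, pvCand2Nil]
  | append_singleton t c ih =>
    rw [List.foldl_append, ih]
    simp only [List.foldl_cons, List.foldl_nil]
    by_cases hc : c = '0'
    · subst hc
      rw [if_pos rfl, pvCand1SnocZero, pvCand2SnocZero]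
      have h1 := pvCand1Facts t
      have h2 := pvCand2Facts t
      refine Prod.ext (by simp) (Prod.ext (by simp) ?_)
      rcases h1 with ⟨h1a, h1b⟩
      rcases h2 with ⟨h2a, h2b⟩
      simp only [max_def]
      split_ifs <;> omega
    · rw [if_neg hc, pvCand1SnocNe t c hc, pvCand2SnocNe t c hc]
      have h1 := pvCand1Facts t
      have h2 := pvCand2Facts t
      refine Prod.ext (by simp [hc]) (Prod.ext (by simp [hc]; omega) ?_)
      rcases h1 with ⟨h1a, h1b⟩
      rcases h2 with ⟨h2a, h2b⟩
      simp only [max_def]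
      split_ifs <;> omega

theorem pvAltEq (s : String) :
    min_pieces_alt s = max (pvCand1 s.toList) (pvCand2 s.toList) := by
  unfold min_pieces_alt pvCand1 pvCand2
  rw [PySem.Str.rfind_eq]
  have h0 : ("0" : String).toList = ['0'] := rfl
  rw [h0]
  simp only [ne_eq, ite_not]
  split_ifs with h1 h2 h2
  · -- trimmed = [], rfind = -1
    simp
  · -- trimmed = [], rfind ≠ -1
    have := pvCand1Facts s.toList
    unfold pvCand1 at this
    rw [if_neg h2] at this
    omega
  · -- trimmed ≠ [], rfind = -1
    simp
  · rfl

-- ===== VERDICT (by name: the statement is the Claim_ definition above) =====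
theorem min_pieces_spec : Claim_equal_min_pieces := by
  intro s _
  unfold Spec_min_pieces
  have hb : min_pieces_alt s = max (pvCand1 s.toList) (pvCand2 s.toList) := pvAltEq s
  have ha : min_pieces s = max (pvCand1 s.toList) (pvCand2 s.toList) := by
    unfold min_pieces
    simp only [PySem.Str.len_eq]
    rw [PySem.List.foldl_pyRange_zero_pyGetD' s.toList ' '
      (fun (st : Int × Int × Int) c => if c = '0' then (st.1 + 1, st.2.1, max st.2.2 st.2.1)
        else (st.1, st.2.1 + 1, max st.2.2 st.1)) ((0:Int),(0:Int),(0:Int)), pvFoldEq]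
  rw [ha, hb]
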